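-- pv_equiv track=rewrite | github.com/Salah-SH/LLM_SC_audits | call_graph.py | extract_contract_lines_procedure
-- ===== SOURCE A (Python) =====
-- def extract_contract_lines_procedure(text,title,keyword):
--     lines = text.split('\n')
--     keyword_line = None
--     keywordnew=title+keyword
--     for i, line in enumerate(lines):
--         if keywordnew in line:
--             keyword_line = i
--             break
--     if keyword_line != None:
--         lines = lines[keyword_line:]
--         extracted_text = '\n'.join(lines)
--         return extracted_text
--     return None
-- ===== SOURCE B (Python) =====
-- def extract_contract_lines_procedure(text, title, keyword):
--     keywordnew = title + keyword
--     suffix = text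
--     while True:
--         head, sep, rest = suffix.partition('\n')
--         if keywordnew in head:
--             return suffix
--         if not sep:
--             return None
--         suffix = rest
-- ===== Notes on version B (the rewrite author's own statement) =====
-- stated objective: simpler
-- what changed: B drops A's split-into-a-line-list / enumerate-for-index / slice / '\n'.join pipeline and instead walks suffixes of the raw text with partition('\n'), returning the matching suffix directly.
import Mathlib
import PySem

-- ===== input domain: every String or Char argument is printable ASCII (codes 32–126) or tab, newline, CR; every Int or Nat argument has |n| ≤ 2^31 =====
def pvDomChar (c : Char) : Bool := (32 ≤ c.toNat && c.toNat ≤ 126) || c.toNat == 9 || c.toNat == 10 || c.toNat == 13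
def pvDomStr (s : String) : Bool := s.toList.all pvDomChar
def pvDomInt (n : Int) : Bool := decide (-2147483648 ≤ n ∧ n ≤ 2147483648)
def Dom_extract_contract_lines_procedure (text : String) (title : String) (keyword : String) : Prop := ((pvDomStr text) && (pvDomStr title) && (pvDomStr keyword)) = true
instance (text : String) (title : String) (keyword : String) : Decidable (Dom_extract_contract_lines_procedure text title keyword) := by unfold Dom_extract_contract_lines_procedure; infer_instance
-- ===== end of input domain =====

-- B replaces A's split-all-lines / enumerate-for-index / slice / rejoin pipeline with a single
-- partition-based walk over suffixes of the raw text, returning the matching suffix directly (objective: simpler).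

-- ===== PORT A =====
-- the 'for i, line in enumerate(lines): if keywordnew in line: keyword_line = i; break' loop
def pvFindLoop (kw : List Char) : List (List Char) → Nat → Option Nat
  | [], _ => none
  | line :: rest, i =>
    if PySem.Chars.isIn kw line then some i else pvFindLoop kw rest (i + 1)

def extract_contract_lines_procedure (text : String) (title : String) (keyword : String) : Option String :=
  let lines := PySem.Chars.splitOn text.toList ['\n']              -- text.split('\n')
  let keywordnew := title.toList ++ keyword.toList                 -- title+keyword
  match pvFindLoop keywordnew lines 0 with
  | some i =>
      let lines2 := PySem.List.slice lines (some (i : Int)) none   -- lines[keyword_line:]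
      some (String.ofList (PySem.Chars.join ['\n'] lines2))        -- '\n'.join(lines)
  | none => none

-- ===== PORT B =====
-- suffix.partition('\n') ported by hand over List Char: (part before the first '\n',
-- rest after it if '\n' occurs); exact by construction
def pvPartition : List Char → List Char × Option (List Char)
  | [] => ([], none)
  | c :: cs =>
    if c = '\n' then ([], some cs)
    else
      let p := pvPartition cs
      (c :: p.1, p.2)

theorem pvPartition_rest_lt : ∀ (s r : List Char), (pvPartition s).2 = some r → r.length < s.length := by
  intro s
  induction s with
  | nil => intro r h; simp [pvPartition] at h
  | cons c cs ih =>
    intro r h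
    by_cases hc : c = '\n'
    · simp [pvPartition, hc] at h; subst h; simp
    · simp [pvPartition, hc] at h
      exact Nat.lt_succ_of_lt (ih r h)

-- the 'while True: head, sep, rest = suffix.partition('\n'); …' loop
def pvScan (kw : List Char) (s : List Char) : Option (List Char) :=
  let p := pvPartition s
  if PySem.Chars.isIn kw p.1 then some s
  else
    match h : p.2 with
    | none => none
    | some rest => pvScan kw rest
termination_by s.length
decreasing_by exact pvPartition_rest_lt s rest h

def extract_contract_lines_procedure_alt (text : String) (title : String) (keyword : String) : Option String :=
  (pvScan (title.toList ++ keyword.toList) text.toList).map String.ofList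

-- ===== PRECONDITION & SPEC =====
def Spec_extract_contract_lines_procedure (text : String) (title : String) (keyword : String) (out : Option String) : Prop := out = extract_contract_lines_procedure_alt text title keyword
instance (text : String) (title : String) (keyword : String) (out : Option String) : Decidable (Spec_extract_contract_lines_procedure text title keyword out) := by unfold Spec_extract_contract_lines_procedure; infer_instance

-- ===== CLAIM (what is proved, stated in full; the proofs are below) =====
def Claim_equal_extract_contract_lines_procedure : Prop := ∀ (text : String) (title : String) (keyword : String), Dom_extract_contract_lines_procedure text title keyword → Spec_extract_contract_lines_procedure text title keyword (extract_contract_lines_procedure text title keyword)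

-- ===== LEMMAS AND PROOFS =====

theorem go_cons (f : Nat) (c : Char) (rest cur : List Char) (acc : List (List Char)) :
    PySem.Chars.splitOn.go ['\n'] (f+1) (c :: rest) cur acc =
      if c = '\n' then PySem.Chars.splitOn.go ['\n'] f rest [] (cur.reverse :: acc)
      else PySem.Chars.splitOn.go ['\n'] f rest (c :: cur) acc := by
  rw [PySem.Chars.splitOn.go]
  by_cases hc : c = '\n'
  · simp [List.isPrefixOf, hc]
  · have hc' : ¬('\n' = c) := fun h => hc h.symm
    simp [List.isPrefixOf, hc, hc']

theorem go_nil (f : Nat) (cur : List Char) (acc : List (List Char)) :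
    PySem.Chars.splitOn.go ['\n'] (f+1) [] cur acc = (cur.reverse :: acc).reverse := by
  rw [PySem.Chars.splitOn.go]; omega

theorem go_acc : ∀ (f : Nat) (l cur : List Char) (acc : List (List Char)),
    PySem.Chars.splitOn.go ['\n'] f l cur acc = acc.reverse ++ PySem.Chars.splitOn.go ['\n'] f l cur [] := by
  intro f
  induction f with
  | zero => intro l cur acc; rw [PySem.Chars.splitOn.go, PySem.Chars.splitOn.go]; simp
  | succ f ih =>
    intro l cur acc
    cases l with
    | nil => rw [go_nil, go_nil]; simp
    | cons c rest =>
      rw [go_cons, go_cons]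
      by_cases hc : c = '\n'
      · simp only [hc]
        rw [ih rest [] (cur.reverse :: acc), ih rest [] [cur.reverse]]
        simp
      · simp only [if_neg hc]
        exact ih rest (c :: cur) acc

theorem go_noNL : ∀ (l : List Char) (f : Nat) (cur : List Char) (acc : List (List Char)),
    ('\n' : Char) ∉ l → l.length < f →
    PySem.Chars.splitOn.go ['\n'] f l cur acc = ((cur.reverse ++ l) :: acc).reverse := by
  intro l
  induction l with
  | nil =>
    intro f cur acc _ hf
    obtain ⟨f', rfl⟩ : ∃ f', f = f' + 1 := ⟨f - 1, by omega⟩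
    rw [go_nil]; simp
  | cons c rest ih =>
    intro f cur acc hnl hf
    obtain ⟨f', rfl⟩ : ∃ f', f = f' + 1 := ⟨f - 1, by omega⟩
    rw [go_cons]
    have hc : c ≠ '\n' := by simp at hnl; tauto
    rw [if_neg hc, ih f' (c :: cur) acc (by simp at hnl; tauto) (by simpa using hf)]
    simp

theorem go_split : ∀ (h : List Char) (f : Nat) (r cur : List Char) (acc : List (List Char)),
    ('\n' : Char) ∉ h → h.length + 1 + r.length < f →
    PySem.Chars.splitOn.go ['\n'] f (h ++ '\n' :: r) cur acc =
      PySem.Chars.splitOn.go ['\n'] (f - (h.length + 1)) r [] ((cur.reverse ++ h) :: acc) := by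
  intro h
  induction h with
  | nil =>
    intro f r cur acc _ hf
    obtain ⟨f', rfl⟩ : ∃ f', f = f' + 1 := ⟨f - 1, by omega⟩
    simp only [List.nil_append]
    rw [go_cons, if_pos rfl]
    simp
  | cons c h' ih =>
    intro f r cur acc hnl hf
    obtain ⟨f', rfl⟩ : ∃ f', f = f' + 1 := ⟨f - 1, by omega⟩
    have hc : c ≠ '\n' := by simp at hnl; tauto
    rw [List.cons_append, go_cons, if_neg hc,
        ih f' r (c :: cur) acc (by simp at hnl; tauto) (by simp at hf ⊢; omega)]
    have e1 : (c :: cur).reverse ++ h' = cur.reverse ++ c :: h' := by simp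
    have e2 : f' - (h'.length + 1) = f' + 1 - ((c :: h').length + 1) := by simp only [List.length_cons]; omega
    rw [e1, e2]

theorem splitOn_noNL (l : List Char) (h : ('\n' : Char) ∉ l) :
    PySem.Chars.splitOn l ['\n'] = [l] := by
  rw [PySem.Chars.splitOn, go_noNL l (l.length+1) [] [] h (by omega)]
  simp

theorem splitOn_split (h r : List Char) (hn : ('\n' : Char) ∉ h) :
    PySem.Chars.splitOn (h ++ '\n' :: r) ['\n'] = h :: PySem.Chars.splitOn r ['\n'] := by
  rw [PySem.Chars.splitOn, go_split h _ r [] [] hn (by simp; omega)]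
  have : (h ++ '\n' :: r).length + 1 - (h.length + 1) = r.length + 1 := by simp
  rw [this, go_acc, PySem.Chars.splitOn]
  simp

theorem pvPartition_head_noNL : ∀ (s : List Char), ('\n' : Char) ∉ (pvPartition s).1 := by
  intro s
  induction s with
  | nil => simp [pvPartition]
  | cons c cs ih =>
    by_cases hc : c = '\n' <;> simp [pvPartition, hc]
    exact ⟨fun h => hc h.symm, ih⟩

theorem pvPartition_decomp : ∀ (s : List Char),
    s = (pvPartition s).1 ++ (match (pvPartition s).2 with
                              | none => ([] : List Char)
                              | some r => '\n' :: r) := by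
  intro s
  induction s with
  | nil => simp [pvPartition]
  | cons c cs ih =>
    by_cases hc : c = '\n' <;> simp [pvPartition, hc]
    exact ih

theorem splitOn_cons_exists (l : List Char) :
    ∃ x xs, PySem.Chars.splitOn l ['\n'] = x :: xs := by
  have hd := pvPartition_decomp l
  have hn := pvPartition_head_noNL l
  set p1 := (pvPartition l).1 with hp1
  cases h2 : (pvPartition l).2 with
  | none =>
    rw [h2] at hd; simp at hd
    exact ⟨l, [], by rw [splitOn_noNL l (hd ▸ hn)]⟩
  | some r =>
    have hd' : l = p1 ++ '\n' :: r := by rw [h2] at hd; simpa using hd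
    refine ⟨p1, PySem.Chars.splitOn r ['\n'], ?_⟩
    conv_lhs => rw [hd']
    exact splitOn_split _ _ hn

theorem pvFindLoop_succ (kw : List Char) : ∀ (ls : List (List Char)) (i : Nat),
    pvFindLoop kw ls (i + 1) = Option.map (· + 1) (pvFindLoop kw ls i) := by
  intro ls
  induction ls with
  | nil => intro i; simp [pvFindLoop]
  | cons line rest ih =>
    intro i
    by_cases hl : PySem.Chars.isIn kw line <;> simp [pvFindLoop, hl, ih]

-- the joint invariant: A's pipeline on a suffix equals B's scan, and '\n'.join undoes split('\n')
theorem pvMain (kw : List Char) : ∀ (n : Nat) (l : List Char), l.length ≤ n →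
    Option.map (fun i => PySem.Chars.join ['\n'] ((PySem.Chars.splitOn l ['\n']).drop i))
      (pvFindLoop kw (PySem.Chars.splitOn l ['\n']) 0) = pvScan kw l ∧
    PySem.Chars.join ['\n'] (PySem.Chars.splitOn l ['\n']) = l := by
  intro n
  induction n with
  | zero =>
    intro l hl
    have hl0 : l = [] := by cases l <;> simp_all
    subst hl0
    rw [splitOn_noNL [] (by simp), pvScan]
    by_cases hk : PySem.Chars.isIn kw [] <;>
      simp [pvFindLoop, pvPartition, hk, PySem.Chars.join_singleton]
  | succ n ih =>
    intro l hl
    have hd := pvPartition_decomp l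
    have hn := pvPartition_head_noNL l
    set p1 := (pvPartition l).1 with hp1
    cases h2 : (pvPartition l).2 with
    | none =>
      rw [h2] at hd; simp at hd
      have hs := splitOn_noNL l (hd ▸ hn)
      rw [hs, pvScan]
      refine ⟨?_, by exact PySem.Chars.join_singleton ..⟩
      by_cases hk : PySem.Chars.isIn kw l
      · rw [if_pos (by rw [← hp1, ← hd]; exact hk)]
        simp [pvFindLoop, hk, PySem.Chars.join_singleton]
      · rw [if_neg (by rw [← hp1, ← hd]; exact hk)]
        have hfl : pvFindLoop kw [l] 0 = none := by simp [pvFindLoop, hk]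
        rw [hfl]
        simp only [Option.map_none]
        split
        · rfl
        · next rest heq => rw [h2] at heq; simp at heq
    | some r =>
      have hd' : l = p1 ++ '\n' :: r := by rw [h2] at hd; simpa using hd
      have hrl : r.length < l.length := pvPartition_rest_lt l r h2
      obtain ⟨ihA, ihJ⟩ := ih r (by omega)
      have hs' : PySem.Chars.splitOn l ['\n'] = p1 :: PySem.Chars.splitOn r ['\n'] := by
        conv_lhs => rw [hd']
        exact splitOn_split _ _ hn
      obtain ⟨x, xs, hxs⟩ := splitOn_cons_exists r
      have ihJ' : PySem.Chars.join ['\n'] (x :: xs) = r := by rw [← hxs]; exact ihJ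
      have hjoin : PySem.Chars.join ['\n'] (PySem.Chars.splitOn l ['\n']) = l := by
        rw [hs', hxs, PySem.Chars.join_cons_cons, ihJ']
        rw [hd']
        simp
      refine ⟨?_, hjoin⟩
      rw [pvScan]
      by_cases hk : PySem.Chars.isIn kw p1
      · rw [if_pos hk, hs']
        have hfl : pvFindLoop kw (p1 :: PySem.Chars.splitOn r ['\n']) 0 = some 0 := by
          simp [pvFindLoop, hk]
        rw [hfl]
        simp only [Option.map_some, List.drop_zero]
        rw [← hs', hjoin]
      · rw [if_neg hk, hs']
        have hfl : pvFindLoop kw (p1 :: PySem.Chars.splitOn r ['\n']) 0 =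
            Option.map (· + 1) (pvFindLoop kw (PySem.Chars.splitOn r ['\n']) 0) := by
          rw [pvFindLoop, if_neg hk]
          exact pvFindLoop_succ kw _ 0
        rw [hfl, Option.map_map]
        have hcomp : ((fun i => PySem.Chars.join ['\n'] ((p1 :: PySem.Chars.splitOn r ['\n']).drop i)) ∘ (· + 1))
            = fun i => PySem.Chars.join ['\n'] ((PySem.Chars.splitOn r ['\n']).drop i) := by
          funext i; simp
        rw [hcomp, ihA]
        split
        · next heq => rw [h2] at heq; simp at heq
        · next rest heq =>
            rw [h2] at heq
            injection heq with hre
            rw [hre]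

-- ===== VERDICT (by name: the statement is the Claim_ definition above) =====
theorem extract_contract_lines_procedure_spec : Claim_equal_extract_contract_lines_procedure := by
  intro text title keyword _
  unfold Spec_extract_contract_lines_procedure extract_contract_lines_procedure extract_contract_lines_procedure_alt
  obtain ⟨hA, _⟩ := pvMain (title.toList ++ keyword.toList) text.toList.length text.toList rfl.le
  rw [← hA]
  cases ho : pvFindLoop (title.toList ++ keyword.toList) (PySem.Chars.splitOn text.toList ['\n']) 0 with
  | none => simp [ho]
  | some i =>
    simp only [ho, Option.map_some]
    rw [PySem.List.slice_from _ (by positivity)]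
    simp
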